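-- pv_equiv track=rewrite | github.com/chingsley/6314_ml_project_sample_collection | EnergySmells_Verified/UnnecessaryRecursion/check_subset_sum_exists/smelly_check_subset_sum_exists.py | check_subset_sum_exists
-- ===== SOURCE A (Python) =====
-- def check_subset_sum_exists(A: list, queries: list) -> list:
--     r = set()
--
--     def f(s, k):
--         if k >= 0:
--             r.add(s)
--             f(s + A[k - 1], k - 1)
--             f(s, k - 1)
--
--     f(0, len(A))
--     return ["yes" if e in r else "no" for e in queries]
-- ===== SOURCE B (Python) =====
-- def check_subset_sum_exists(A: list, queries: list) -> list:
--     sums = {0}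
--     for a in A:
--         sums |= {s + a for s in sums}
--     return ["yes" if q in sums else "no" for q in queries]
-- ===== Notes on version B (the rewrite author's own statement) =====
-- stated objective: faster
-- what changed: Replaces the O(2^n) include/exclude recursion over all subsets with an incremental subset-sum DP that folds each element into a set of distinct reachable sums.
-- crash fix: On empty A Python's A raises IndexError (it evaluates A[-1] before the guarded recursive call); B returns the natural answer: 'yes' exactly for query 0. — e.g. on check_subset_sum_exists([], [0, 5]): A raises IndexError, B returns ["yes", "no"]
import Mathlib
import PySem

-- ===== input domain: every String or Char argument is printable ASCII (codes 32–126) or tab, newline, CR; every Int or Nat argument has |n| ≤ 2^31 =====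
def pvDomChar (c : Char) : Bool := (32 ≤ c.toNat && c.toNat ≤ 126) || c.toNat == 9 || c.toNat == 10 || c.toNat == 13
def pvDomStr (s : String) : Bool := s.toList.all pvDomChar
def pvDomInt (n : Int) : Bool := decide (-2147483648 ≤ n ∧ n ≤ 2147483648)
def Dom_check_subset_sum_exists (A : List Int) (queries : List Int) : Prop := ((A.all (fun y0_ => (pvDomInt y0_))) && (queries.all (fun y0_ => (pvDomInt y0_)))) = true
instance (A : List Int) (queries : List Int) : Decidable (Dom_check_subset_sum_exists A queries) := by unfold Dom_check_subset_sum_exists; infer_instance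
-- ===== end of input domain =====

-- B replaces A's O(2^n) include/exclude recursion by an incremental subset-sum DP over a set
-- of distinct reachable sums (objective: faster).

-- ===== PORT A =====
-- A's recursion f(s, k): for k ≥ 0 add s to r, then recurse on k-1 with and without A[k-1].
-- The Nat argument is Python's k (calls with k = -1 return immediately and are omitted).
-- At k = 0 Python still evaluates A[-1] before the vacuous call: on A = [] that raises
-- IndexError (excluded by Pre_); the `.getD 0` total form is only reached outside Pre_.
def fA (A : List Int) : Nat → Int → PySem.Set Int → PySem.Set Int
  | 0, s, r => PySem.Set.add r s
  | (k+1), s, r =>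
      let r1 := PySem.Set.add r s
      let r2 := fA A k (s + (PySem.List.pyGet? A (k : Int)).getD 0) r1
      fA A k s r2

def check_subset_sum_exists (A : List Int) (queries : List Int) : List String :=
  let r := fA A A.length 0 PySem.Set.empty
  queries.map (fun e => if PySem.Set.contains r e then "yes" else "no")

-- ===== PORT B =====
def check_subset_sum_exists_alt (A : List Int) (queries : List Int) : List String :=
  let sums := A.foldl (fun S a => PySem.Set.update S (S.map (fun s => s + a))) (PySem.Set.ofList [(0 : Int)])
  queries.map (fun q => if PySem.Set.contains sums q then "yes" else "no")

-- ===== PRECONDITION & SPEC =====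
-- Pre_ excludes only A = [], on which Python's A raises IndexError (it evaluates A[-1]).
def Pre_check_subset_sum_exists (A : List Int) (queries : List Int) : Prop := A ≠ []
instance (A : List Int) (queries : List Int) : Decidable (Pre_check_subset_sum_exists A queries) := by unfold Pre_check_subset_sum_exists; infer_instance
def pvWitness_check_subset_sum_exists : List Int × List Int := ([1, 2], [3, 0, 5])

-- On empty A Python's A raises IndexError; B returns the natural answer ("yes" exactly for query 0).
def Raises_check_subset_sum_exists (A : List Int) (queries : List Int) : Prop := A = []
instance (A : List Int) (queries : List Int) : Decidable (Raises_check_subset_sum_exists A queries) := by unfold Raises_check_subset_sum_exists; infer_instance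
def pvRaiseWitness_check_subset_sum_exists : List Int × List Int := ([], [0, 5])
def pvRaiseWitnessOut_check_subset_sum_exists : List String := ["yes", "no"]

def Spec_check_subset_sum_exists (A : List Int) (queries : List Int) (out : List String) : Prop := out = check_subset_sum_exists_alt A queries
instance (A : List Int) (queries : List Int) (out : List String) : Decidable (Spec_check_subset_sum_exists A queries out) := by unfold Spec_check_subset_sum_exists; infer_instance

-- ===== CLAIM (what is proved, stated in full; the proofs are below) =====
def Claim_equal_check_subset_sum_exists : Prop := ∀ (A : List Int) (queries : List Int), Dom_check_subset_sum_exists A queries → Pre_check_subset_sum_exists A queries → Spec_check_subset_sum_exists A queries (check_subset_sum_exists A queries)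
def Claim_raises_check_subset_sum_exists : Prop := (∀ (A : List Int) (queries : List Int), Dom_check_subset_sum_exists A queries → Raises_check_subset_sum_exists A queries → ¬ Pre_check_subset_sum_exists A queries) ∧ (Dom_check_subset_sum_exists (pvRaiseWitness_check_subset_sum_exists.1) (pvRaiseWitness_check_subset_sum_exists.2) ∧ Raises_check_subset_sum_exists (pvRaiseWitness_check_subset_sum_exists.1) (pvRaiseWitness_check_subset_sum_exists.2) ∧ check_subset_sum_exists_alt (pvRaiseWitness_check_subset_sum_exists.1) (pvRaiseWitness_check_subset_sum_exists.2) = pvRaiseWitnessOut_check_subset_sum_exists)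

-- ===== LEMMAS AND PROOFS =====

-- SS l t: t is the sum of some (possibly empty) subset of l.
def SS : List Int → Int → Prop
  | [], t => t = 0
  | a :: l, t => SS l t ∨ SS l (t - a)

theorem SS_zero (l : List Int) : SS l 0 := by
  induction l with
  | nil => rfl
  | cons a l ih => exact Or.inl ih

theorem SS_snoc (l : List Int) (a t : Int) : SS (l ++ [a]) t ↔ SS l t ∨ SS l (t - a) := by
  induction l generalizing t with
  | nil => simp [SS]
  | cons b l ih =>
      have h : t - b - a = t - a - b := by ring
      simp only [List.cons_append, SS, ih, h]
      tauto

theorem mem_fA (A : List Int) (k : Nat) (s : Int) (r : PySem.Set Int) (e : Int)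
    (h : k ≤ A.length) : e ∈ fA A k s r ↔ e ∈ r ∨ SS (A.take k) (e - s) := by
  induction k generalizing s r with
  | zero =>
      simp only [fA, PySem.Set.mem_add, List.take_zero, SS]
      constructor
      · rintro (h | h)
        · exact Or.inl h
        · exact Or.inr (by omega)
      · rintro (h | h)
        · exact Or.inl h
        · exact Or.inr (by omega)
  | succ k ih =>
      have hk : k < A.length := h
      have hget : (PySem.List.pyGet? A (k : Int)).getD 0 = A[k] := by
        simp [PySem.List.pyGet?_natCast, List.getElem?_eq_getElem hk]
      have htake : A.take (k + 1) = A.take k ++ [A[k]] := by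
        rw [List.take_add_one, List.getElem?_eq_getElem hk]; rfl
      simp only [fA, hget, htake, SS_snoc]
      rw [ih _ _ (Nat.le_of_lt hk), ih _ _ (Nat.le_of_lt hk), PySem.Set.mem_add]
      have h1 : e - (s + A[k]) = e - s - A[k] := by ring
      rw [h1]
      constructor
      · rintro (((h | rfl) | h) | h)
        · exact Or.inl h
        · exact Or.inr (Or.inl (by simpa using SS_zero (A.take k)))
        · exact Or.inr (Or.inr h)
        · exact Or.inr (Or.inl h)
      · rintro (h | (h | h))
        · exact Or.inl (Or.inl (Or.inl h))
        · exact Or.inr h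
        · exact Or.inl (Or.inr h)

theorem mem_foldB (l : List Int) (S0 : List Int) (e : Int) :
    e ∈ l.foldl (fun S a => PySem.Set.update S (S.map (fun s => s + a))) S0 ↔
      ∃ x ∈ S0, SS l (e - x) := by
  induction l generalizing S0 with
  | nil =>
      simp only [List.foldl_nil, SS]
      constructor
      · intro h; exact ⟨e, h, by omega⟩
      · rintro ⟨x, hx, hex⟩
        have : x = e := by omega
        exact this ▸ hx
  | cons a l ih =>
      simp only [List.foldl_cons, ih, SS]
      constructor
      · rintro ⟨x, hx, hss⟩
        rcases (PySem.Set.mem_update S0 _ _).mp hx with hx | hx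
        · exact ⟨x, hx, Or.inl hss⟩
        · rcases List.mem_map.mp hx with ⟨y, hy, rfl⟩
          refine ⟨y, hy, Or.inr ?_⟩
          have : e - (y + a) = e - y - a := by ring
          rwa [this] at hss
      · rintro ⟨x, hx, hss | hss⟩
        · exact ⟨x, (PySem.Set.mem_update S0 _ _).mpr (Or.inl hx), hss⟩
        · refine ⟨x + a, (PySem.Set.mem_update S0 _ _).mpr (Or.inr (List.mem_map.mpr ⟨x, hx, rfl⟩)), ?_⟩
          have : e - (x + a) = e - x - a := by ring
          rwa [this]

theorem contains_eq (A : List Int) (e : Int) :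
    PySem.Set.contains (fA A A.length 0 PySem.Set.empty) e =
      PySem.Set.contains (A.foldl (fun S a => PySem.Set.update S (S.map (fun s => s + a))) (PySem.Set.ofList [(0 : Int)])) e := by
  rw [Bool.eq_iff_iff, PySem.Set.contains_iff, PySem.Set.contains_iff,
    mem_fA A A.length 0 PySem.Set.empty e (le_refl _),
    mem_foldB A (PySem.Set.ofList [(0 : Int)]) e]
  constructor
  · rintro (h | h)
    · exact absurd h (List.not_mem_nil)
    · exact ⟨0, by simp [PySem.Set.ofList], by simpa using h⟩
  · rintro ⟨x, hx, hss⟩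
    have hx0 : x = 0 := by simpa [PySem.Set.ofList, PySem.Set.add] using hx
    subst hx0
    exact Or.inr (by simpa using hss)

-- ===== VERDICT (by name: the statement is the Claim_ definition above) =====
theorem check_subset_sum_exists_spec : Claim_equal_check_subset_sum_exists := by
  intro A queries _ _
  unfold Spec_check_subset_sum_exists check_subset_sum_exists check_subset_sum_exists_alt
  simp only [contains_eq]

theorem check_subset_sum_exists_raises : Claim_raises_check_subset_sum_exists := by
  unfold Claim_raises_check_subset_sum_exists
  exact ⟨fun A q _ hr hp => hp hr, by decide⟩

-- self-check: the crash region's witness really lies outside Pre_ (from the raises theorem's first part)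
theorem pvRaiseWitness_outside_Pre_ok :
    ¬ Pre_check_subset_sum_exists pvRaiseWitness_check_subset_sum_exists.1 pvRaiseWitness_check_subset_sum_exists.2 :=
  check_subset_sum_exists_raises.1 _ _ (by decide) (by decide)
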